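-- pv_equiv track=rewrite | github.com/pratham0039/filmpro | characters/tests.py | has_lowercase_word
-- ===== SOURCE A (Python) =====
-- def has_lowercase_word(line):
--     words = line.split()  # Split the line into words
--     for word in words:
--         if any(char.islower() for char in word):
--             return True
--         if word=='-':
--             return True
--     return False
-- ===== SOURCE B (Python) =====
-- def has_lowercase_word(line):
--     # Character-level state machine over the raw line: no word list is ever built.
--     # state 0 = at a word boundary, 1 = current word so far is exactly a lone dash, 2 = other word
--     state = 0
--     for ch in line:
--         if ch.islower():
--             return True
--         if ch.isspace():
--             if state == 1:
--                 return True
--             state = 0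
--         elif ch == '-':
--             state = 1 if state == 0 else 2
--         else:
--             state = 2
--     return state == 1
-- ===== Notes on version B (the rewrite author's own statement) =====
-- stated objective: alternative
-- what changed: Replaces A's split-into-words loop with a single character-level state machine over the raw line that never builds a word list: it tracks whether the current word so far is exactly a lone dash and returns on the first lowercase character or on completing a dash token.
import Mathlib
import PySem

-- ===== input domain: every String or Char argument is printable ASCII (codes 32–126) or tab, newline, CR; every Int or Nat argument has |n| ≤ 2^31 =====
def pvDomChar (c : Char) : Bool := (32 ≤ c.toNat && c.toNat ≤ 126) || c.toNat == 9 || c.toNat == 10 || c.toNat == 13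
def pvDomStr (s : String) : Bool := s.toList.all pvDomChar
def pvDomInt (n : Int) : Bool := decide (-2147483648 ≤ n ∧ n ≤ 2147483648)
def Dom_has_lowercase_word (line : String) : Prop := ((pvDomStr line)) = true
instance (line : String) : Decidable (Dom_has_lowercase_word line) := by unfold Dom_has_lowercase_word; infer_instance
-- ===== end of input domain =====

-- B replaces A's split-into-words loop by a character-level state machine over the raw
-- line (no word list is ever built): a different decomposition, same O(n) cost (simpler).

-- ===== PORT A =====
-- early-exit loop over the words, branches in A's order
def hlwLoopA : List String → Bool
  | [] => false
  | w :: ws =>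
    if w.toList.any PySem.Chars.islower then true
    else if w == "-" then true
    else hlwLoopA ws

def has_lowercase_word (line : String) : Bool :=
  hlwLoopA (PySem.Str.split₀ line)

-- ===== PORT B =====
-- Source B's DFA: state 0 = at word boundary, 1 = current word so far is exactly a lone dash, 2 = other
def hlwScanB : List Char → Nat → Bool
  | [], st => st == 1
  | c :: cs, st =>
    if PySem.Chars.islower c then true
    else if PySem.Chars.isspace c then
      if st == 1 then true else hlwScanB cs 0
    else if c == '-' then hlwScanB cs (if st == 0 then 1 else 2)
    else hlwScanB cs 2

def has_lowercase_word_alt (line : String) : Bool := hlwScanB line.toList 0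

-- ===== PRECONDITION & SPEC =====
def Spec_has_lowercase_word (line : String) (out : Bool) : Prop := out = has_lowercase_word_alt line
instance (line : String) (out : Bool) : Decidable (Spec_has_lowercase_word line out) := by unfold Spec_has_lowercase_word; infer_instance

-- ===== CLAIM (what is proved, stated in full; the proofs are below) =====
def Claim_equal_has_lowercase_word : Prop := ∀ (line : String), Dom_has_lowercase_word line → Spec_has_lowercase_word line (has_lowercase_word line)

-- ===== LEMMAS AND PROOFS =====

-- A's early-exit loop is the disjunction of the two independent scans
theorem hlwLoopA_eq (ws : List String) :
    hlwLoopA ws = (ws.any (fun w => w.toList.any PySem.Chars.islower) || ws.contains "-") := by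
  induction ws with
  | nil => rfl
  | cons w ws ih =>
    simp only [hlwLoopA]
    split_ifs with h1 h2
    · rw [List.any_cons, h1, Bool.true_or, Bool.true_or]
    · have h := eq_of_beq h2
      subst h
      rw [List.contains_cons, (by rfl : (("-" : String) == "-") = true), Bool.true_or, Bool.or_true]
    · have h1' : (w.toList.any PySem.Chars.islower) = false := Bool.eq_false_iff.mpr h1
      have h2' : ("-" == w) = false := by
        cases hb : ("-" == w) with
        | false => rfl
        | true => exact absurd (beq_iff_eq.mpr (eq_of_beq hb).symm) h2
      rw [List.any_cons, List.contains_cons, ih, h1', h2', Bool.false_or, Bool.false_or]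

-- split₀.go's accumulator is a prefix of the result
theorem hlw_go_acc (s cur : List Char) (acc : List (List Char)) :
    PySem.Chars.split₀.go s cur acc = acc.reverse ++ PySem.Chars.split₀.go s cur [] := by
  induction s generalizing cur acc with
  | nil =>
    by_cases h : cur.isEmpty <;> simp [PySem.Chars.split₀.go, h]
  | cons c rest ih =>
    by_cases hs : PySem.Chars.isspace c
    · by_cases h : cur.isEmpty
      · simp only [PySem.Chars.split₀.go, hs, h, if_true]
        exact ih [] acc
      · simp only [PySem.Chars.split₀.go, hs, h, if_true, if_false]
        rw [ih [] (cur.reverse :: acc), ih [] [cur.reverse]]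
        simp
    · simp only [PySem.Chars.split₀.go, hs, if_false]
      exact ih (c :: cur) acc

-- the state B maintains is exactly the classification of the current partial word
def hlwEnc (cur : List Char) : Nat :=
  if cur = [] then 0 else if cur = ['-'] then 1 else 2

-- main invariant: B's DFA equals "a lowercase char remains, or split₀.go yields a '-' token"
theorem hlwScanB_go (cs : List Char) : ∀ (cur : List Char),
    hlwScanB cs (hlwEnc cur)
      = (cs.any PySem.Chars.islower || (PySem.Chars.split₀.go cs cur []).contains ['-']) := by
  induction cs with
  | nil =>
    intro cur
    by_cases h0 : cur = []
    · subst h0; simp [hlwScanB, hlwEnc, PySem.Chars.split₀.go]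
    · by_cases h1 : cur = ['-']
      · subst h1; simp [hlwScanB, hlwEnc, PySem.Chars.split₀.go]
      · have hdr : ¬(['-'] = cur.reverse) := fun hr =>
          h1 (by simpa using congrArg List.reverse hr.symm)
        simp [hlwScanB, hlwEnc, h0, h1, PySem.Chars.split₀.go, List.isEmpty_iff, hdr]
  | cons c rest ih =>
    intro cur
    by_cases hl : PySem.Chars.islower c
    · have hs : PySem.Chars.isspace c = false := by
        simp only [PySem.Chars.islower, Bool.and_eq_true, decide_eq_true_eq, Char.le_def,
          UInt32.le_iff_toNat_le] at hl
        simp only [PySem.Chars.isspace, Char.toNat]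
        simp only [Bool.or_eq_false_iff, Bool.and_eq_false_iff, decide_eq_false_iff_not]
        have ha : ('a'.val.toNat) = 97 := rfl
        have hz : ('z'.val.toNat) = 122 := rfl
        omega
      simp [hlwScanB, hl, List.any_cons]
    · by_cases hs : PySem.Chars.isspace c
      · -- word boundary: flush the current word
        by_cases h1 : cur = ['-']
        · subst h1
          simp only [hlwScanB, hlwEnc, if_false, if_true, hl, hs,
            reduceCtorEq, reduceIte]
          simp only [PySem.Chars.split₀.go, hs, if_true, List.isEmpty_cons, if_false,
            Bool.false_eq_true]
          rw [hlw_go_acc rest [] [['-'].reverse]]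
          simp
        · by_cases h0 : cur = []
          · subst h0
            simp only [hlwScanB, hlwEnc, hl, hs, reduceIte, Nat.zero_ne_one,
              reduceCtorEq]
            have := ih []
            simp only [hlwEnc, reduceIte] at this
            rw [this]
            simp only [PySem.Chars.split₀.go, hs, if_true, List.isEmpty_nil, reduceIte]
            simp [hl]
          · simp only [hlwScanB, hlwEnc, h0, h1, hl, hs, reduceIte,
              Nat.succ_ne_self]
            have h2ne : (2 : Nat) ≠ 1 := by decide
            simp only [OfNat.ofNat_ne_one, reduceIte, beq_iff_eq, h2ne, if_false]
            have := ih []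
            simp only [hlwEnc, reduceIte] at this
            rw [this]
            simp only [PySem.Chars.split₀.go, hs, if_true, List.isEmpty_iff, h0, if_false]
            rw [hlw_go_acc rest [] [cur.reverse]]
            have hdr : ¬(['-'] = cur.reverse) := fun hr =>
              h1 (by simpa using congrArg List.reverse hr.symm)
            simp [List.any_cons, hl, hdr]
      · -- inside a word: extend the current word (the state follows hlwEnc)
        have hstep : hlwScanB (c :: rest) (hlwEnc cur) = hlwScanB rest (hlwEnc (c :: cur)) := by
          simp only [hlwScanB, hl, hs, if_false, Bool.false_eq_true]
          by_cases hc : c = '-'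
          · subst hc
            by_cases h0 : cur = []
            · subst h0; simp [hlwEnc]
            · have hne : ('-' :: cur) ≠ ['-'] := fun h => by cases h; exact h0 rfl
              rcases eq_or_ne cur ['-'] with h1 | h1 <;> simp [hlwEnc, h0, h1, hne]
          · have hcc : (c == '-') = false := by
              cases hb : (c == '-') with
              | false => rfl
              | true => exact absurd (eq_of_beq hb) hc
            have hne : (c :: cur) ≠ ['-'] := fun h => by cases h; exact hc rfl
            simp [hlwEnc, hcc, hne]
        rw [hstep, ih (c :: cur)]
        simp only [PySem.Chars.split₀.go, hs, if_false, Bool.false_eq_true]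
        simp [List.any_cons, hl]

-- transfer the '-' membership from the word-list side to the char-list side
theorem hlw_contains_dash (line : String) :
    (PySem.Str.split₀ line).contains "-"
      = (PySem.Chars.split₀ line.toList).contains ['-'] := by
  rw [← PySem.Str.split₀_map_toList]
  simp only [List.contains_eq_any_beq, List.any_map]
  congr 1
  funext w
  by_cases h : w = "-"
  · subst h; rfl
  · have h2 : ("-" == w) = false := by
      cases hb : ("-" == w) with
      | false => rfl
      | true => exact absurd (eq_of_beq hb).symm h
    have h3 : (['-'] == w.toList) = false := by
      cases hb : (['-'] == w.toList) with
      | false => rfl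
      | true =>
        have hw : w.toList = ('-'.toString).toList := (eq_of_beq hb).symm
        exact absurd (String.toList_inj.mp hw) h
    simp only [Function.comp]
    rw [h2, h3]

-- a lowercase ASCII letter is never whitespace, so word-wise scan = whole-line scan
theorem hlw_islower_not_isspace (c : Char) (h : PySem.Chars.islower c = true) :
    PySem.Chars.isspace c = false := by
  simp only [PySem.Chars.islower, Bool.and_eq_true, decide_eq_true_eq, Char.le_def,
    UInt32.le_iff_toNat_le] at h
  simp only [PySem.Chars.isspace, Char.toNat]
  simp only [Bool.or_eq_false_iff, Bool.and_eq_false_iff, decide_eq_false_iff_not]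
  have ha : ('a'.val.toNat) = 97 := rfl
  have hz : ('z'.val.toNat) = 122 := rfl
  omega

theorem hlw_go_flatten (s cur : List Char) (acc : List (List Char)) :
    (PySem.Chars.split₀.go s cur acc).flatten
      = acc.reverse.flatten ++ cur.reverse ++ s.filter (fun c => !PySem.Chars.isspace c) := by
  induction s generalizing cur acc with
  | nil =>
    by_cases h : cur.isEmpty <;>
      simp_all [PySem.Chars.split₀.go, List.isEmpty_iff]
  | cons c rest ih =>
    by_cases hs : PySem.Chars.isspace c
    · by_cases h : cur.isEmpty <;>
        simp_all [PySem.Chars.split₀.go, List.isEmpty_iff]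
    · simp_all [PySem.Chars.split₀.go]

theorem hlw_split₀_flatten (cs : List Char) :
    (PySem.Chars.split₀ cs).flatten = cs.filter (fun c => !PySem.Chars.isspace c) := by
  simpa using hlw_go_flatten cs [] []

theorem hlw_words_any (line : String) :
    (PySem.Str.split₀ line).any (fun w => w.toList.any PySem.Chars.islower)
      = line.toList.any PySem.Chars.islower := by
  have h1 : (PySem.Str.split₀ line).any (fun w => w.toList.any PySem.Chars.islower)
      = (PySem.Chars.split₀ line.toList).any (fun w => w.any PySem.Chars.islower) := by
    rw [← PySem.Str.split₀_map_toList, List.any_map]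
    rfl
  rw [h1, ← List.any_flatten, hlw_split₀_flatten]
  induction line.toList with
  | nil => rfl
  | cons c cs ih =>
    by_cases hs : PySem.Chars.isspace c
    · have : PySem.Chars.islower c = false := by
        by_contra h
        rw [Bool.not_eq_false] at h
        exact absurd (hlw_islower_not_isspace c h) (by simp [hs])
      simp [hs, this, ih]
    · simp [hs, ih]

-- ===== VERDICT (by name: the statement is the Claim_ definition above) =====
theorem has_lowercase_word_spec : Claim_equal_has_lowercase_word := by
  intro line _
  unfold Spec_has_lowercase_word has_lowercase_word has_lowercase_word_alt
  rw [hlwLoopA_eq, hlw_words_any, hlw_contains_dash]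
  have := hlwScanB_go line.toList []
  simp only [hlwEnc, reduceIte] at this
  rw [this]
  rfl
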